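-- pv_equiv track=rewrite | github.com/jinyes-kim/Problem-Solving | baekjoon/BruteForce/3085.사탕 게임.py | check
-- ===== SOURCE A (Python) =====
-- def check(board, st_row, ed_row, st_col, ed_col):
--     result = 1
--     length = len(board)
--
--     for row in range(st_row, ed_row+1):
--         tmp_row = 1
--         for i in range(1, length):
--             if board[row][i] == board[row][i-1]:
--                 tmp_row += 1
--                 if tmp_row > result:
--                     result = tmp_row
--             else:
--                 tmp_row = 1
--
--     for col in range(st_col, ed_col+1):
--         tmp_col = 1
--         for i in range(1, length):
--             if board[i][col] == board[i-1][col]: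
--                 tmp_col += 1
--                 if tmp_col > result:
--                     result = tmp_col
--             else:
--                 tmp_col = 1
--
--     return result
-- ===== SOURCE B (Python) =====
-- def _runs(seq):
--     out = []
--     for x in seq:
--         if out and out[-1][0] == x:
--             out[-1][1] += 1
--         else:
--             out.append([x, 1])
--     return out
--
--
-- def check(board, st_row, ed_row, st_col, ed_col):
--     n = len(board)
--     if n < 2:
--         return 1
--     lines = [board[r][:n] for r in range(st_row, ed_row + 1)]
--     lines += [[board[i][c] for i in range(n)] for c in range(st_col, ed_col + 1)]
--     best = 1
--     for line in lines:
--         for _, k in _runs(line):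
--             if k > best:
--                 best = k
--     return best
-- ===== Notes on version B (the rewrite author's own statement) =====
-- stated objective: alternative
-- what changed: Replaces A's inline tmp-counter scans with running max updated inside nested loops by extracting each requested row/column as an explicit line, run-length-encoding each line with a helper, and taking the maximum over all run lengths.
import Mathlib
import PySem

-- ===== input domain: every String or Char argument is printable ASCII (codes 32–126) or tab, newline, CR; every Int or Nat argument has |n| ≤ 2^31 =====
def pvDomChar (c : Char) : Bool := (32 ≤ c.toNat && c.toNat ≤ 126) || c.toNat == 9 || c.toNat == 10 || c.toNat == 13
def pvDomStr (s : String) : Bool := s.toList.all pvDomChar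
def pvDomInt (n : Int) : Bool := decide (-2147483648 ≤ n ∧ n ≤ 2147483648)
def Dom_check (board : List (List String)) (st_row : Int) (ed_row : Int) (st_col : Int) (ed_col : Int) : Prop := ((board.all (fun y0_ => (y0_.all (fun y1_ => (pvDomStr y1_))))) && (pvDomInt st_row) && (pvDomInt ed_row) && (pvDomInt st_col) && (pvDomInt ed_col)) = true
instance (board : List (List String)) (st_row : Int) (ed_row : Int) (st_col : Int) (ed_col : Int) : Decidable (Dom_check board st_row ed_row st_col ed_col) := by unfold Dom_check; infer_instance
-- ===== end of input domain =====

-- B replaces A's inline tmp-counter scans by extracting each requested row/column as a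
-- line, run-length-encoding it with a helper, and taking the maximum run length (objective: alternative).

-- ===== PORT A =====
-- board[r][i] with Python negative-index semantics; default values are never reached under Pre_.
def cellA (board : List (List String)) (r i : Int) : String :=
  PySem.List.pyGetD (PySem.List.pyGetD board r []) i ""

def check (board : List (List String)) (st_row : Int) (ed_row : Int) (st_col : Int) (ed_col : Int) : Int :=
  let n : Int := (board.length : Int)
  let result : Int :=
    (PySem.List.pyRange st_row (ed_row + 1) 1).foldl (fun result row =>
      ((PySem.List.pyRange 1 n 1).foldl (fun (p : Int × Int) i =>
        if cellA board row i == cellA board row (i - 1) then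
          let t := p.2 + 1
          (if t > p.1 then t else p.1, t)
        else (p.1, 1)) (result, 1)).1) 1
  (PySem.List.pyRange st_col (ed_col + 1) 1).foldl (fun result col =>
    ((PySem.List.pyRange 1 n 1).foldl (fun (p : Int × Int) i =>
      if cellA board i col == cellA board (i - 1) col then
        let t := p.2 + 1
        (if t > p.1 then t else p.1, t)
      else (p.1, 1)) (result, 1)).1) result

-- ===== PORT B =====
-- _runs, with the mutable 'out' list kept in reverse (its last element at the head); reversed at the end.
def runsStep : List (String × Int) → String → List (String × Int)
  | [], x => [(x, 1)]
  | (y, k) :: rest, x => if y == x then (y, k + 1) :: rest else (x, 1) :: (y, k) :: rest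

def runsOf (line : List String) : List (String × Int) :=
  (line.foldl runsStep []).reverse

def check_alt (board : List (List String)) (st_row : Int) (ed_row : Int) (st_col : Int) (ed_col : Int) : Int :=
  let n : Int := (board.length : Int)
  if n < 2 then 1
  else
    let lines : List (List String) :=
      (PySem.List.pyRange st_row (ed_row + 1) 1).map
        (fun r => PySem.List.slice (PySem.List.pyGetD board r []) none (some n)) ++
      (PySem.List.pyRange st_col (ed_col + 1) 1).map
        (fun c => (PySem.List.pyRange 0 n 1).map (fun i => PySem.List.pyGetD (PySem.List.pyGetD board i []) c ""))
    lines.foldl (fun best line =>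
      (runsOf line).foldl (fun b p => if p.2 > b then p.2 else b) best) 1

-- ===== PRECONDITION & SPEC =====
-- Pre_ excludes exactly the inputs on which A raises IndexError: a nonempty row window
-- reaching outside the board or a visited row shorter than the board, or a nonempty column
-- window out of range for some row (when the board has ≥ 2 rows; otherwise A never indexes).
def Pre_check (board : List (List String)) (st_row : Int) (ed_row : Int) (st_col : Int) (ed_col : Int) : Prop :=
  2 ≤ board.length →
    ((st_row ≤ ed_row →
        -(board.length : Int) ≤ st_row ∧ ed_row < (board.length : Int) ∧
        ∀ r ∈ PySem.List.pyRange st_row (ed_row + 1) 1,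
          board.length ≤ (PySem.List.pyGetD board r []).length) ∧
     (st_col ≤ ed_col →
        ∀ row ∈ board, -(row.length : Int) ≤ st_col ∧ ed_col < (row.length : Int)))
instance (board : List (List String)) (st_row : Int) (ed_row : Int) (st_col : Int) (ed_col : Int) : Decidable (Pre_check board st_row ed_row st_col ed_col) := by unfold Pre_check; infer_instance

def pvWitness_check : List (List String) × Int × Int × Int × Int :=
  ([["a", "a"], ["a", "b"]], 0, 1, 0, 1)

def Spec_check (board : List (List String)) (st_row : Int) (ed_row : Int) (st_col : Int) (ed_col : Int) (out : Int) : Prop := out = check_alt board st_row ed_row st_col ed_col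
instance (board : List (List String)) (st_row : Int) (ed_row : Int) (st_col : Int) (ed_col : Int) (out : Int) : Decidable (Spec_check board st_row ed_row st_col ed_col out) := by unfold Spec_check; infer_instance

-- ===== CLAIM (what is proved, stated in full; the proofs are below) =====
def Claim_equal_check : Prop := ∀ (board : List (List String)) (st_row : Int) (ed_row : Int) (st_col : Int) (ed_col : Int), Dom_check board st_row ed_row st_col ed_col → Pre_check board st_row ed_row st_col ed_col → Spec_check board st_row ed_row st_col ed_col (check board st_row ed_row st_col ed_col)

-- ===== LEMMAS AND PROOFS =====

-- Best run length of prev-run (already tmp long) followed by rest.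
def gRun (prev : String) (tmp : Int) : List String → Int
  | [] => tmp
  | x :: r => if x == prev then gRun x (tmp + 1) r else max tmp (gRun x 1 r)

-- A's inner scan, with the previous cell made explicit.
def scanAcc (p : Int × Int) (prev : String) : List String → Int × Int
  | [] => p
  | x :: r =>
    scanAcc (if x == prev then
        let t := p.2 + 1
        ((if t > p.1 then t else p.1), t)
      else (p.1, 1)) x r

-- B's inner max-fold over a run list.
def mx (b : Int) (l : List (String × Int)) : Int :=
  l.foldl (fun b p => if p.2 > b then p.2 else b) b

lemma gRun_ge : ∀ (l : List String) (prev : String) (tmp : Int), tmp ≤ gRun prev tmp l := by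
  intro l
  induction l with
  | nil => intro prev tmp; simp [gRun]
  | cons x r ih =>
    intro prev tmp
    simp only [gRun]
    split
    · have := ih x (tmp + 1); omega
    · have := le_max_left tmp (gRun x 1 r); omega

lemma scanAcc_fst : ∀ (rest : List String) (prev : String) (res tmp : Int),
    1 ≤ tmp → tmp ≤ res → (scanAcc (res, tmp) prev rest).1 = max res (gRun prev tmp rest) := by
  intro rest
  induction rest with
  | nil => intro prev res tmp h1 h2; simp [scanAcc, gRun]; omega
  | cons x r ih =>
    intro prev res tmp h1 h2
    simp only [scanAcc, gRun]
    by_cases hx : x = prev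
    · have hb : (x == prev) = true := by simp [hx]
      simp only [if_pos hb]
      have hstep : (if tmp + 1 > res then tmp + 1 else res) = max res (tmp + 1) := by omega
      rw [show ((if tmp + 1 > res then tmp + 1 else res), tmp + 1) = (max res (tmp + 1), tmp + 1) by rw [hstep]]
      rw [ih x (max res (tmp + 1)) (tmp + 1) (by omega) (by omega)]
      have := gRun_ge r x (tmp + 1)
      omega
    · have hb : ¬ ((x == prev) = true) := by simp [hx]
      simp only [if_neg hb]
      rw [ih x res 1 (by omega) (by omega)]
      have := gRun_ge r x 1
      omega

lemma mx_cons (b : Int) (p : String × Int) (l : List (String × Int)) :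
    mx b (p :: l) = mx (max b p.2) l := by
  simp only [mx, List.foldl_cons]
  congr 1
  omega

lemma mx_max_comm : ∀ (l : List (String × Int)) (b c : Int), mx (max b c) l = max c (mx b l) := by
  intro l
  induction l with
  | nil => intro b c; simp [mx]; omega
  | cons p l ih =>
    intro b c
    rw [mx_cons, mx_cons, show max (max b c) p.2 = max (max b p.2) c by omega, ih]

lemma mx_reverse : ∀ (l : List (String × Int)) (b : Int), mx b l.reverse = mx b l := by
  intro l
  induction l with
  | nil => intro b; rfl
  | cons p l ih =>
    intro b
    have happ : mx b (l.reverse ++ [p]) = mx (mx b l.reverse) [p] := by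
      simp [mx, List.foldl_append]
    simp only [List.reverse_cons]
    rw [happ, ih, mx_cons, mx_cons, mx_max_comm, mx_max_comm]
    simp [mx]

lemma mx_runsAux : ∀ (cs : List String) (prev : String) (tmp : Int) (acc : List (String × Int)) (b : Int),
    mx b (cs.foldl runsStep ((prev, tmp) :: acc)) = max (gRun prev tmp cs) (mx b acc) := by
  intro cs
  induction cs with
  | nil =>
    intro prev tmp acc b
    simp only [List.foldl_nil, gRun]
    rw [mx_cons, mx_max_comm]
  | cons x r ih =>
    intro prev tmp acc b
    simp only [List.foldl_cons, runsStep, gRun]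
    by_cases hx : prev = x
    · subst hx
      have hb : (prev == prev) = true := by simp
      simp only [if_pos hb]
      rw [ih]
    · have hb : ¬ ((prev == x) = true) := by simp [hx]
      have hb' : ¬ ((x == prev) = true) := by simp [Ne.symm hx]
      simp only [if_neg hb, if_neg hb']
      rw [ih, mx_cons, mx_max_comm]
      have := gRun_ge r x 1
      omega

lemma mx_runsOf (c : String) (cs : List String) (b : Int) :
    mx b (runsOf (c :: cs)) = max b (gRun c 1 cs) := by
  unfold runsOf
  rw [mx_reverse]
  simp only [List.foldl_cons, runsStep]
  rw [mx_runsAux]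
  simp only [mx, List.foldl_nil]
  omega

lemma fold_idx (f : Int → String) :
    ∀ (rest : List String) (prev : String) (a : Int) (p : Int × Int),
      (∀ j : Nat, j < rest.length → f (a + j) = rest.getD j "") →
      f (a - 1) = prev →
      (PySem.List.pyRange a (a + (rest.length : Int)) 1).foldl
        (fun p i => if f i == f (i - 1) then
            let t := p.2 + 1
            ((if t > p.1 then t else p.1), t)
          else (p.1, 1)) p
      = scanAcc p prev rest := by
  intro rest
  induction rest with
  | nil =>
    intro prev a p hget hprev
    rw [PySem.List.pyRange_one_eq_nil (by simp)]
    rfl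
  | cons x r ih =>
    intro prev a p hget hprev
    have hlen : (List.length (x :: r) : Int) = (r.length : Int) + 1 := by
      simp
    rw [hlen, PySem.List.pyRange_one_cons (by omega)]
    simp only [List.foldl_cons]
    have hx : f a = x := by
      have := hget 0 (by simp)
      simpa using this
    rw [hx, hprev]
    have harith : a + ((r.length : Int) + 1) = (a + 1) + (r.length : Int) := by omega
    rw [harith]
    rw [ih x (a + 1) _
      (by
        intro j hj
        have h2 := hget (j + 1) (by simp; omega)
        push_cast at h2
        rw [show a + ((j : Int) + 1) = a + 1 + (j : Int) by omega] at h2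
        simpa using h2)
      (by simpa using hx)]
    rfl

lemma foldl_eq_and_ge {α : Type} : ∀ (l : List α) (f h : Int → α → Int) (res : Int),
    1 ≤ res →
    (∀ x ∈ l, ∀ b : Int, 1 ≤ b → f b x = h b x ∧ 1 ≤ f b x) →
    l.foldl f res = l.foldl h res ∧ 1 ≤ l.foldl f res := by
  intro l
  induction l with
  | nil => intro f h res hres _; exact ⟨rfl, hres⟩
  | cons x t ih =>
    intro f h res hres hstep
    obtain ⟨heq, hge⟩ := hstep x (by simp) res hres
    simp only [List.foldl_cons]
    rw [← heq]
    exact ih f h (f res x) hge (fun y hy => hstep y (by simp [hy]))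

lemma foldl_self {α : Type} : ∀ (l : List α) (b : Int), l.foldl (fun x _ => x) b = b := by
  intro l
  induction l with
  | nil => intro b; rfl
  | cons x t ih => intro b; exact ih b

lemma row_step (board : List (List String)) (r b : Int) (hb : 1 ≤ b)
    (h2 : 2 ≤ board.length)
    (hlen : board.length ≤ (PySem.List.pyGetD board r []).length) :
    ((PySem.List.pyRange 1 (board.length : Int) 1).foldl (fun (p : Int × Int) i =>
        if cellA board r i == cellA board r (i - 1) then
          let t := p.2 + 1
          ((if t > p.1 then t else p.1), t)
        else (p.1, 1)) (b, 1)).1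
      = (runsOf (PySem.List.slice (PySem.List.pyGetD board r []) none (some (board.length : Int)))).foldl
          (fun b p => if p.2 > b then p.2 else b) b
    ∧ 1 ≤ ((PySem.List.pyRange 1 (board.length : Int) 1).foldl (fun (p : Int × Int) i =>
        if cellA board r i == cellA board r (i - 1) then
          let t := p.2 + 1
          ((if t > p.1 then t else p.1), t)
        else (p.1, 1)) (b, 1)).1 := by
  have hslice : PySem.List.slice (PySem.List.pyGetD board r []) none (some (board.length : Int))
      = (PySem.List.pyGetD board r []).take board.length := PySem.List.slice_to_natCast _ _
  set row := PySem.List.pyGetD board r [] with hrowdef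
  have htlen : (row.take board.length).length = board.length := by
    simp [List.length_take]; omega
  cases hline : row.take board.length with
  | nil => rw [hline] at htlen; simp at htlen; omega
  | cons c cs =>
    have hcs : cs.length = board.length - 1 := by
      rw [hline] at htlen; simp at htlen; omega
    have hrange : (board.length : Int) = 1 + (cs.length : Int) := by
      have : 1 ≤ board.length := by omega
      omega
    have hgetrow : ∀ j : Nat, (hj : j < board.length) → cellA board r (j : Int) = row[j]'(by omega) := by
      intro j hj
      show PySem.List.pyGetD row (j : Int) "" = _
      rw [PySem.List.pyGetD_eq_getElem row "" (by omega) (by omega)]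
      simp
    have hline_get : ∀ j : Nat, (hj : j < board.length) → (c :: cs).getD j "" = row[j]'(by omega) := by
      intro j hj
      rw [← hline]
      rw [List.getD_eq_getElem _ _ (by omega)]
      simp [List.getElem_take]
    have hkey := fold_idx (fun i => cellA board r i) cs c 1 (b, 1)
      (by
        intro j hj
        have h1 : cellA board r (1 + (j : Int)) = row[j + 1]'(by omega) := by
          have := hgetrow (j + 1) (by omega)
          push_cast at this
          rw [show (1 : Int) + (j : Int) = (j : Int) + 1 by omega]
          exact this
        have h2' : (c :: cs).getD (j + 1) "" = row[j + 1]'(by omega) := hline_get (j + 1) (by omega)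
        simp only [List.getD_cons_succ] at h2'
        show cellA board r (1 + (j : Int)) = cs.getD j ""
        rw [h1, h2'])
      (by
        have h1 := hgetrow 0 (by omega)
        have h2' := hline_get 0 (by omega)
        simp only [List.getD_cons_zero] at h2'
        show cellA board r ((1 : Int) - 1) = c
        rw [show (1 : Int) - 1 = ((0 : Nat) : Int) by omega, h1, h2'])
    rw [hslice, hline, hrange]
    beta_reduce at hkey
    rw [hkey]
    have hfst := scanAcc_fst cs c b 1 (by omega) hb
    constructor
    · rw [hfst]
      have := mx_runsOf c cs b
      simp only [mx] at this
      rw [this]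
    · rw [hfst]
      omega

lemma col_step (board : List (List String)) (c b : Int) (hb : 1 ≤ b)
    (h2 : 2 ≤ board.length) :
    ((PySem.List.pyRange 1 (board.length : Int) 1).foldl (fun (p : Int × Int) i =>
        if cellA board i c == cellA board (i - 1) c then
          let t := p.2 + 1
          ((if t > p.1 then t else p.1), t)
        else (p.1, 1)) (b, 1)).1
      = (runsOf ((PySem.List.pyRange 0 (board.length : Int) 1).map
            (fun i => PySem.List.pyGetD (PySem.List.pyGetD board i []) c ""))).foldl
          (fun b p => if p.2 > b then p.2 else b) b
    ∧ 1 ≤ ((PySem.List.pyRange 1 (board.length : Int) 1).foldl (fun (p : Int × Int) i =>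
        if cellA board i c == cellA board (i - 1) c then
          let t := p.2 + 1
          ((if t > p.1 then t else p.1), t)
        else (p.1, 1)) (b, 1)).1 := by
  have hlen : ((PySem.List.pyRange 0 (board.length : Int) 1).map
      (fun i => PySem.List.pyGetD (PySem.List.pyGetD board i []) c "")).length = board.length := by
    simp [PySem.List.length_pyRange_one]
  have hget : ∀ j : Nat, (hj : j < board.length) →
      ((PySem.List.pyRange 0 (board.length : Int) 1).map
        (fun i => PySem.List.pyGetD (PySem.List.pyGetD board i []) c "")).getD j ""
      = cellA board (j : Int) c := by
    intro j hj
    rw [List.getD_eq_getElem _ _ (by omega)]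
    simp only [List.getElem_map]
    rw [PySem.List.getElem_pyRange_one]
    show PySem.List.pyGetD _ _ _ = _
    simp [cellA]
  obtain ⟨c0, cs, hline⟩ : ∃ c0 cs, (PySem.List.pyRange 0 (board.length : Int) 1).map
      (fun i => PySem.List.pyGetD (PySem.List.pyGetD board i []) c "") = c0 :: cs := by
    cases h : (PySem.List.pyRange 0 (board.length : Int) 1).map
        (fun i => PySem.List.pyGetD (PySem.List.pyGetD board i []) c "") with
    | nil => rw [h] at hlen; simp at hlen; omega
    | cons a l => exact ⟨a, l, rfl⟩
  have hcs : cs.length = board.length - 1 := by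
    rw [hline] at hlen; simp at hlen; omega
  have hrange : (board.length : Int) = 1 + (cs.length : Int) := by omega
  have hkey := fold_idx (fun i => cellA board i c) cs c0 1 (b, 1)
    (by
      intro j hj
      have h1 := hget (j + 1) (by omega)
      rw [hline] at h1
      simp only [List.getD_cons_succ] at h1
      show cellA board ((1 : Int) + (j : Int)) c = cs.getD j ""
      rw [h1]
      congr 1
      push_cast
      omega)
    (by
      have h1 := hget 0 (by omega)
      rw [hline] at h1
      simp only [List.getD_cons_zero] at h1
      show cellA board ((1 : Int) - 1) c = c0
      rw [show (1 : Int) - 1 = ((0 : Nat) : Int) by omega]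
      exact h1.symm)
  rw [hline, hrange]
  beta_reduce at hkey
  rw [hkey]
  have hfst := scanAcc_fst cs c0 b 1 (by omega) hb
  constructor
  · rw [hfst]
    have := mx_runsOf c0 cs b
    simp only [mx] at this
    rw [this]
  · rw [hfst]
    omega

-- ===== VERDICT (by name: the statement is the Claim_ definition above) =====
theorem check_spec : Claim_equal_check := by
  intro board st_row ed_row st_col ed_col hdom hpre
  unfold Spec_check
  simp only [check, check_alt]
  by_cases hn : ((board.length : Int) < 2)
  · rw [if_pos hn]
    have hnil : PySem.List.pyRange 1 (board.length : Int) 1 = ([] : List Int) :=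
      PySem.List.pyRange_one_eq_nil (by omega)
    simp only [hnil, List.foldl_nil]
    rw [foldl_self, foldl_self]
  · rw [if_neg hn]
    have h2 : 2 ≤ board.length := by omega
    obtain ⟨hrow, hcol⟩ := hpre h2
    rw [List.foldl_append, List.foldl_map, List.foldl_map]
    obtain ⟨hreq, hrge⟩ := foldl_eq_and_ge (PySem.List.pyRange st_row (ed_row + 1) 1) _ _ 1 (by omega)
      (by
        intro r hr b hb
        have hsr : st_row ≤ ed_row := by
          have := (PySem.List.mem_pyRange_one.mp hr)
          omega
        exact row_step board r b hb h2 ((hrow hsr).2.2 r hr))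
    rw [hreq]
    obtain ⟨hceq, _⟩ := foldl_eq_and_ge (PySem.List.pyRange st_col (ed_col + 1) 1) _ _ _ hrge
      (by
        intro cc hc b hb
        exact col_step board cc b hb h2)
    rw [← hreq, hceq, hreq]
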